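-- pv_equiv track=rewrite | github.com/microsoft/ai-edu | 基础教程/A7-强化学习/draft/30-租车问题 - 转移概率矩阵/src/RentCar-2-A-B.py | counter_1
-- ===== SOURCE A (Python) =====
-- def counter_1(X, rent_from, return_to):
--     ni = 0
--     nj = 0
--     for x in range(len(X)-1):
--         if rent_from == X[x]:
--             ni += 1
--             if return_to == X[x+1]:
--                 nj += 1
--     return ni, nj
-- ===== SOURCE B (Python) =====
-- def counter_1(X, rent_from, return_to):
--     # Build frequency tables (Counter-style indexes) once; the queried values
--     # never appear inside the loops -- the answer is two dictionary lookups.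
--     pair_freq = {}
--     for p in zip(X, X[1:]):
--         pair_freq[p] = pair_freq.get(p, 0) + 1
--     first_freq = {}
--     for a in X[:-1]:
--         first_freq[a] = first_freq.get(a, 0) + 1
--     return first_freq.get(rent_from, 0), pair_freq.get((rent_from, return_to), 0)
-- ===== Notes on version B (the rewrite author's own statement) =====
-- stated objective: alternative
-- what changed: Replaces A's single index loop testing rent_from/return_to inside the loop by building two frequency dictionaries (a histogram of adjacent pairs and of prefix values) once, then answering with two lookups; the query values never occur in the loops.
import Mathlib
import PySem

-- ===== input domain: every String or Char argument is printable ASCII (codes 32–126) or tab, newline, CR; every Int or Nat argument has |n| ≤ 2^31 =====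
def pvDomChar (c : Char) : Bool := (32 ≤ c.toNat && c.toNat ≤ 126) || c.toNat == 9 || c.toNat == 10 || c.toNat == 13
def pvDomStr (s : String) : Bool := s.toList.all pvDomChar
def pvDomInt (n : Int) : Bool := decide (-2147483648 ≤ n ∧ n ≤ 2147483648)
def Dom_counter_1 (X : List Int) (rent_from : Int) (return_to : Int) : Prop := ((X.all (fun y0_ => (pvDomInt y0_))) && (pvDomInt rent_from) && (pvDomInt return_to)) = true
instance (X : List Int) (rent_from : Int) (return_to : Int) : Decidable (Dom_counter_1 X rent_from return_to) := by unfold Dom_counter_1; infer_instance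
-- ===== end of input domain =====

-- B replaces A's single two-counter index loop by building two frequency dictionaries (adjacent pairs, prefix values) once and answering with two lookups; same return value, same O(n) cost.


-- ===== PORT A =====
def counter_1 (X : List Int) (rent_from : Int) (return_to : Int) : Int × Int :=
  (PySem.List.pyRange 0 ((X.length : Int) - 1) 1).foldl
    (fun (acc : Int × Int) x =>
      if rent_from == PySem.List.pyGetD X x 0 then
        (acc.1 + 1, if return_to == PySem.List.pyGetD X (x + 1) 0 then acc.2 + 1 else acc.2)
      else acc) (0, 0)

-- ===== PORT B =====
def counter_1_alt (X : List Int) (rent_from : Int) (return_to : Int) : Int × Int :=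
  let pair_freq : PySem.Dict (Int × Int) Int :=
    (X.zip (PySem.List.slice X (some 1) none)).foldl
      (fun d p => d.insert p (d.getD p 0 + 1)) PySem.Dict.empty
  let first_freq : PySem.Dict Int Int :=
    (PySem.List.slice X none (some (-1))).foldl
      (fun d a => d.insert a (d.getD a 0 + 1)) PySem.Dict.empty
  (first_freq.getD rent_from 0, pair_freq.getD (rent_from, return_to) 0)

-- ===== PRECONDITION & SPEC =====
def Spec_counter_1 (X : List Int) (rent_from : Int) (return_to : Int) (out : Int × Int) : Prop := out = counter_1_alt X rent_from return_to
instance (X : List Int) (rent_from : Int) (return_to : Int) (out : Int × Int) : Decidable (Spec_counter_1 X rent_from return_to out) := by unfold Spec_counter_1; infer_instance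

-- ===== CLAIM =====
def Claim_equal_counter_1 : Prop := ∀ (X : List Int) (rent_from : Int) (return_to : Int), Dom_counter_1 X rent_from return_to → Spec_counter_1 X rent_from return_to (counter_1 X rent_from return_to)

-- ===== LEMMAS AND PROOFS =====

-- fst components of zip-with-tail form the dropLast prefix
theorem map_fst_zip_tail (X : List Int) : (X.zip X.tail).map Prod.fst = X.dropLast := by
  induction X with
  | nil => rfl
  | cons a t ih =>
    cases t with
    | nil => rfl
    | cons b t' => simpa using ih

-- A's loop body over the pair list computes the two counts
theorem fold_pairs (rf rt : Int) (P : List (Int × Int)) (a b : Int) :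
    P.foldl (fun (acc : Int × Int) (p : Int × Int) =>
        if rf == p.1 then
          (acc.1 + 1, if rt == p.2 then acc.2 + 1 else acc.2)
        else acc) (a, b)
      = (a + ((P.map Prod.fst).count rf : Int),
         b + ((P.count (rf, rt)) : Int)) := by
  induction P generalizing a b with
  | nil => simp
  | cons p t ih =>
    simp only [List.foldl_cons, List.map_cons, List.count_cons]
    by_cases h1 : rf == p.1
    · have p1 : p.1 = rf := (beq_iff_eq.mp h1).symm
      rw [if_pos h1]
      by_cases h2 : rt == p.2
      · have p2 : p.2 = rt := (beq_iff_eq.mp h2).symm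
        have hp : p = (rf, rt) := by cases p; simp_all
        rw [if_pos h2, ih]
        simp [Prod.ext_iff, p1, hp]
        constructor <;> omega
      · have p2 : ¬ p.2 = rt := fun h => h2 (beq_iff_eq.mpr h.symm)
        have hp : ¬ p = (rf, rt) := by cases p; simp_all
        rw [if_neg h2, ih]
        simp [Prod.ext_iff, hp]
        omega
    · have p1 : ¬ p.1 = rf := fun h => h1 (beq_iff_eq.mpr h.symm)
      have hp : ¬ p = (rf, rt) := by cases p; simp_all [Prod.ext_iff]
      rw [if_neg h1, ih]
      simp [p1, hp]

-- A's index loop over range(len(X)-1) equals a fold over the adjacent-pair list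
theorem range_fold (rf rt : Int) (X : List Int) :
    (PySem.List.pyRange 0 (((X.zip X.tail).length : Int)) 1).foldl
      (fun (acc : Int × Int) x =>
        if rf == PySem.List.pyGetD X x 0 then
          (acc.1 + 1, if rt == PySem.List.pyGetD X (x + 1) 0 then acc.2 + 1 else acc.2)
        else acc) (0, 0)
    = (X.zip X.tail).foldl
      (fun (acc : Int × Int) (p : Int × Int) =>
        if rf == p.1 then
          (acc.1 + 1, if rt == p.2 then acc.2 + 1 else acc.2)
        else acc) (0, 0) := by
  refine Eq.trans (PySem.List.foldl_congr_mem _ _ _ _ ?_)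
    (PySem.List.foldl_pyRange_zero_pyGetD' (X.zip X.tail) (((0 : Int), (0 : Int)))
      (fun (acc : Int × Int) (p : Int × Int) =>
        if rf == p.1 then
          (acc.1 + 1, if rt == p.2 then acc.2 + 1 else acc.2)
        else acc) (((0 : Int), (0 : Int))))
  intro acc j hj
  have hj' := (PySem.List.mem_pyRange_one).mp hj
  have h0 : 0 ≤ j := hj'.1
  have hjP : j < ((X.zip X.tail).length : Int) := hj'.2
  have hjn : j.toNat < (X.zip X.tail).length := by omega
  have hjX : j.toNat < X.length := by
    simp only [List.length_zip] at hjn; omega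
  have hjt : j.toNat < X.tail.length := by
    simp only [List.length_zip] at hjn; omega
  have hj1X : j.toNat + 1 < X.length := by
    simp only [List.length_tail] at hjt; omega
  have e1 : PySem.List.pyGetD X j 0 = X[j.toNat]'hjX :=
    PySem.List.pyGetD_eq_getElem _ _ h0 (by omega)
  have e2 : PySem.List.pyGetD X (j + 1) 0 = X[(j + 1).toNat]'(by omega) :=
    PySem.List.pyGetD_eq_getElem _ _ (by omega) (by omega)
  have e3 : PySem.List.pyGetD (X.zip X.tail) j ((0 : Int), (0 : Int))
      = (X.zip X.tail)[j.toNat]'hjn :=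
    PySem.List.pyGetD_eq_getElem _ _ h0 hjP
  have ez : (X.zip X.tail)[j.toNat]'hjn = (X[j.toNat]'hjX, X.tail[j.toNat]'hjt) := by
    simp [List.getElem_zip]
  have et : X.tail[j.toNat]'hjt = X[j.toNat + 1]'hj1X := by
    simp [List.getElem_tail]
  have ei : (j + 1).toNat = j.toNat + 1 := by omega
  rw [e1, e2, e3, ez, et]
  simp [ei]

-- ===== VERDICT =====
theorem counter_1_spec : Claim_equal_counter_1 := by
  intro X rent_from return_to _
  unfold Spec_counter_1 counter_1 counter_1_alt
  simp only [PySem.Dict.getD_foldl_insert_add_one, PySem.Dict.getD_empty,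
    PySem.List.slice_to_neg_one, PySem.List.slice_from_one]
  cases X with
  | nil => rfl
  | cons x0 xs =>
    have hlen : ((((x0 :: xs) : List Int).length : Int) - 1)
        = (((((x0 :: xs) : List Int).zip ((x0 :: xs) : List Int).tail).length : Int)) := by
      simp
    rw [hlen, range_fold, fold_pairs, map_fst_zip_tail]
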